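-- pv_equiv track=rewrite | github.com/ShajahanAI/codewars | python/7 kyu/42.py | jumbled_solar_system
-- ===== SOURCE A (Python) =====
-- def jumbled_solar_system(solar_system):
--     solar_order = ["Asteroid", "Pluto", "Mercury", "Mars", "Venus", "Earth", "Neptune", "Uranus", "Saturn", "Jupiter"]
--     result = []
--     for celestial_body_idx in range(len(solar_system) - 1):
--         curr_celestial_body = solar_order.index(solar_system[celestial_body_idx])
--         next_celestial_body = solar_order.index(solar_system[celestial_body_idx + 1])
--
--         if next_celestial_body < curr_celestial_body:
--             result.append('<')
--         elif next_celestial_body > curr_celestial_body: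
--             result.append('>')
--         else:
--             result.append('=')
--
--     return result
-- ===== SOURCE B (Python) =====
-- def jumbled_solar_system(solar_system):
--     solar_order = ["Asteroid", "Pluto", "Mercury", "Mars", "Venus", "Earth", "Neptune", "Uranus", "Saturn", "Jupiter"]
--
--     def compare(a, b):
--         # decide the symbol by which of the two names occurs first in solar order,
--         # without ever computing numeric indices
--         if a == b:
--             return '='
--         for name in solar_order:
--             if name == a:
--                 return '>'   # a comes earlier, so the next body ranks higher
--             if name == b:
--                 return '<'
--         raise ValueError("unknown celestial body")
--
--     if len(solar_system) < 2:
--         return []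
--     return [compare(solar_system[0], solar_system[1])] + jumbled_solar_system(solar_system[1:])
-- ===== Notes on version B (the rewrite author's own statement) =====
-- stated objective: alternative
-- what changed: B recurses over the list pairwise and decides each symbol by a single first-occurrence scan of solar_order (whichever of the two names appears first wins), computing no numeric indices at all, instead of A's index loop that calls solar_order.index twice per position.
import Mathlib
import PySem

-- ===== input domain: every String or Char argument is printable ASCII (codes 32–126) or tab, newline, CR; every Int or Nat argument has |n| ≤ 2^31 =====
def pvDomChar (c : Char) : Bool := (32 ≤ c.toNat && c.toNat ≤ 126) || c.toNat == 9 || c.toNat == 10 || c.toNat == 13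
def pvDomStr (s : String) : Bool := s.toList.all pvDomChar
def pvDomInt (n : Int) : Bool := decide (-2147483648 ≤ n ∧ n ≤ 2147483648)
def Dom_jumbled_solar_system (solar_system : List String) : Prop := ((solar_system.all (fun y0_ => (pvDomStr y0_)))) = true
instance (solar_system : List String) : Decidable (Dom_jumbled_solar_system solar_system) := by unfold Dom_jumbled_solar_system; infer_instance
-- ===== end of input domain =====

-- B recurses pairwise and decides each symbol by one first-occurrence scan of solar_order
-- (no numeric indices), instead of A's index loop calling solar_order.index twice per position
-- (objective: alternative).

-- shared module constant (the literal list both Python versions write out)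
def solarOrder : List String :=
  ["Asteroid", "Pluto", "Mercury", "Mars", "Venus", "Earth", "Neptune", "Uranus", "Saturn", "Jupiter"]

-- ===== PORT A =====
-- solar_order.index(x): Python raises ValueError when x is absent — excluded by Pre_;
-- the total form uses .getD 0 there (never reached under Pre_).
def jumbled_solar_system (solar_system : List String) : List String :=
  (PySem.List.pyRange 0 ((solar_system.length : Int) - 1) 1).foldl
    (fun result i =>
      let curr := (PySem.List.index? solarOrder (PySem.List.pyGetD solar_system i "")).getD 0
      let next := (PySem.List.index? solarOrder (PySem.List.pyGetD solar_system (i + 1) "")).getD 0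
      if next < curr then result ++ ["<"]
      else if next > curr then result ++ [">"]
      else result ++ ["="]) []

-- ===== PORT B =====
-- compare(a, b): scan solar_order for whichever name occurs first; Source B raises
-- ValueError when the scan is exhausted (both absent, excluded by Pre_) —
-- the total form returns "=" there (never reached under Pre_).
def compareScan (a b : String) : List String → String
  | [] => "="
  | name :: rest =>
    if name = a then ">"
    else if name = b then "<"
    else compareScan a b rest

def comparePlanets (a b : String) : String :=
  if a = b then "=" else compareScan a b solarOrder

def jumbled_solar_system_alt : List String → List String
  | a :: b :: t => comparePlanets a b :: jumbled_solar_system_alt (b :: t)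
  | _ => []

-- ===== PRECONDITION & SPEC =====
-- A raises ValueError (from .index) iff the list has at least two elements and some element
-- is not a solar_order name; with fewer than two elements no element is indexed.
def Pre_jumbled_solar_system (solar_system : List String) : Prop :=
  solar_system.length < 2 ∨ ∀ b ∈ solar_system, b ∈ solarOrder
instance (solar_system : List String) : Decidable (Pre_jumbled_solar_system solar_system) := by
  unfold Pre_jumbled_solar_system; infer_instance

def pvWitness_jumbled_solar_system : List String := ["Earth", "Mars", "Mars", "Jupiter"]

def Spec_jumbled_solar_system (solar_system : List String) (out : List String) : Prop :=
  out = jumbled_solar_system_alt solar_system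
instance (solar_system : List String) (out : List String) : Decidable (Spec_jumbled_solar_system solar_system out) := by
  unfold Spec_jumbled_solar_system; infer_instance

-- ===== CLAIM (what is proved, stated in full; the proofs are below) =====
def Claim_equal_jumbled_solar_system : Prop := ∀ (solar_system : List String), Dom_jumbled_solar_system solar_system → Pre_jumbled_solar_system solar_system → Spec_jumbled_solar_system solar_system (jumbled_solar_system solar_system)

-- ===== LEMMAS AND PROOFS =====

-- A's index-based symbol for a pair of names
def byIndex (a b : String) : String :=
  let curr := (PySem.List.index? solarOrder a).getD 0
  let next := (PySem.List.index? solarOrder b).getD 0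
  if next < curr then "<" else if next > curr then ">" else "="

-- On members of solarOrder the scan-based comparison agrees with the index-based one.
theorem compare_eq_byIndex :
    ∀ a ∈ solarOrder, ∀ b ∈ solarOrder, comparePlanets a b = byIndex a b := by
  decide

-- Comparing adjacent elements by index over range(len-1) is comparing zip xs (tail xs).
theorem range_adj_eq_zip_tail {α β : Type} (d : α) (f : α → α → β) :
    ∀ (xs : List α),
      (List.range (xs.length - 1)).map (fun k => f (xs.getD k d) (xs.getD (k + 1) d))
        = (xs.zip xs.tail).map (fun p => f p.1 p.2)
  | [] => by simp
  | [x] => by simp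
  | x :: y :: t => by
    have ih := range_adj_eq_zip_tail d f (y :: t)
    simp only [List.length_cons, Nat.add_sub_cancel, List.range_succ_eq_map,
      List.map_cons, List.map_map, List.zip_cons_cons, List.tail_cons] at *
    refine congrArg₂ _ rfl ?_
    simpa using ih

theorem jumbled_A_eq_map (solar_system : List String) :
    jumbled_solar_system solar_system
      = (List.range (solar_system.length - 1)).map (fun k =>
          byIndex (solar_system.getD k "") (solar_system.getD (k + 1) "")) := by
  unfold jumbled_solar_system
  rw [PySem.List.pyRange_one]
  have hcast : ((solar_system.length : Int) - 1 - 0).toNat = solar_system.length - 1 := by omega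
  rw [hcast]
  rw [List.foldl_map]
  have hbody : (fun (result : List String) (k : Nat) =>
      (fun result i =>
        let curr := (PySem.List.index? solarOrder (PySem.List.pyGetD solar_system i "")).getD 0
        let next := (PySem.List.index? solarOrder (PySem.List.pyGetD solar_system (i + 1) "")).getD 0
        if next < curr then result ++ ["<"]
        else if next > curr then result ++ [">"]
        else result ++ ["="]) result ((0 : Int) + k))
      = (fun (result : List String) (k : Nat) => result ++
          [byIndex (solar_system.getD k "") (solar_system.getD (k + 1) "")]) := by
    funext result k
    have h1 : (0 : Int) + (k : Int) = ((k : Nat) : Int) := by omega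
    have h2 : ((k : Nat) : Int) + 1 = (((k + 1 : Nat)) : Int) := by omega
    simp only [h1, h2, PySem.List.pyGetD_natCast, byIndex]
    split_ifs <;> rfl
  rw [hbody, PySem.List.foldl_append_singleton_eq_map]
  simp

-- B's recursion computes the map of comparePlanets over adjacent pairs.
theorem jumbled_B_eq_map :
    ∀ (xs : List String),
      jumbled_solar_system_alt xs = (xs.zip xs.tail).map (fun p => comparePlanets p.1 p.2)
  | [] => by simp [jumbled_solar_system_alt]
  | [x] => by simp [jumbled_solar_system_alt]
  | x :: y :: t => by
    rw [jumbled_solar_system_alt]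
    rw [jumbled_B_eq_map (y :: t)]
    simp

-- ===== VERDICT (by name: the statement is the Claim_ definition above) =====
theorem jumbled_solar_system_spec : Claim_equal_jumbled_solar_system := by
  intro solar_system _ hpre
  unfold Spec_jumbled_solar_system
  rw [jumbled_B_eq_map, jumbled_A_eq_map, range_adj_eq_zip_tail ("") byIndex solar_system]
  rcases hpre with hlen | hmem
  · interval_cases h : solar_system.length <;>
      (rcases solar_system with _ | ⟨a, _ | ⟨b, t⟩⟩ <;> simp_all)
  · refine List.map_congr_left ?_
    intro p hp
    obtain ⟨h1, h2⟩ := List.of_mem_zip hp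
    exact (compare_eq_byIndex p.1 (hmem _ h1) p.2 (hmem _ (List.mem_of_mem_tail h2))).symm
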